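-- pv_equiv track=rewrite | github.com/parthaped/lab5personal | scripts/assemble_headless.py | build_text_coe
-- ===== SOURCE A (Python) =====
-- def dec2bin(num, digits):
--     return bin(num)[2:].zfill(digits)
--
-- def build_dicts():
--     ops = {
--         'add': '00000', 'sub': '00001',
--         'sll': '00010', 'srl': '00011', 'sra': '00100',
--         'and': '00101', 'or':  '00110', 'xor': '00111',
--         'slt': '01000', 'sgt': '01001', 'seq': '01010',
--         'send': '01011', 'recv': '01100',
--         'jr':  '01101', 'wpix': '01110', 'rpix': '01111',
--         'beq': '10000', 'bne': '10001', 'ori': '10010',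
--         'lw':  '10011', 'sw':  '10100',
--         'j':   '11000', 'jal': '11001', 'clrscr': '11010',
--         'la':  '10010',
--     }
--     types = {'00': 'r', '01': 'r', '10': 'i', '11': 'j'}
--     regs = {'$zero': '00000', '$pc': '00001', '$ra': '00010'}
--     for i in range(3, 32):
--         regs[f'$r{i}'] = dec2bin(i, 5)
--     return ops, types, regs
--
-- def build_text_coe(text_lines, d_labels, t_labels):
--     ops, types, regs = build_dicts()
--     out = ['MEMORY_INITIALIZATION_RADIX=2;', 'MEMORY_INITIALIZATION_VECTOR=']
--
--     for idx, line in enumerate(text_lines):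
--         args = line.strip().split()
--         op = args[0]
--         binop = ops[op]
--         optype = types[binop[0:2]]
--         cmd = binop
--
--         if optype == 'r':
--             for j in range(1, len(args)):
--                 cmd += regs[args[j]]
--         elif optype == 'i':
--             if op == 'la':
--                 cmd += regs[args[1]] + regs['$zero'] + d_labels[args[2]]
--             elif op in ('lw', 'sw'):
--                 cmd += regs[args[1]] + regs[args[2]] + d_labels[args[3]]
--             elif op in ('beq', 'bne'):
--                 cmd += regs[args[1]] + regs[args[2]] + t_labels[args[3]]
--             else:
--                 cmd += regs[args[1]] + regs[args[2]] + dec2bin(int(args[3]), 16)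
--         else:
--             if op in ('j', 'jal'):
--                 cmd += t_labels[args[1]]
--
--         cmd = cmd.ljust(32, '0')
--         last = idx == len(text_lines) - 1
--         out.append(cmd + (';' if last else ','))
--     return out
-- ===== SOURCE B (Python) =====
-- # B: table-driven encoder — one operand-format spec per opcode, folded uniformly,
-- # instead of build_dicts + type-prefix classification + if/elif dispatch.
--
-- def dec2bin(num, digits):
--     return bin(num)[2:].zfill(digits)
--
-- _REGS = {'$zero': '00000', '$pc': '00001', '$ra': '00010',
--          **{f'$r{i}': dec2bin(i, 5) for i in range(3, 32)}}
--
-- # Field kinds: ('R', i) register at args[i]; ('Z',) literal $zero field;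
-- # ('D', i) data label; ('T', i) text label; ('I', i) 16-bit immediate;
-- # ('R*',) all registers args[1:].
-- _TABLE = {
--     'add': ('00000', (('R*',),)), 'sub': ('00001', (('R*',),)),
--     'sll': ('00010', (('R*',),)), 'srl': ('00011', (('R*',),)),
--     'sra': ('00100', (('R*',),)),
--     'and': ('00101', (('R*',),)), 'or': ('00110', (('R*',),)),
--     'xor': ('00111', (('R*',),)),
--     'slt': ('01000', (('R*',),)), 'sgt': ('01001', (('R*',),)),
--     'seq': ('01010', (('R*',),)),
--     'send': ('01011', (('R*',),)), 'recv': ('01100', (('R*',),)),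
--     'jr': ('01101', (('R*',),)), 'wpix': ('01110', (('R*',),)),
--     'rpix': ('01111', (('R*',),)),
--     'beq': ('10000', (('R', 1), ('R', 2), ('T', 3))),
--     'bne': ('10001', (('R', 1), ('R', 2), ('T', 3))),
--     'ori': ('10010', (('R', 1), ('R', 2), ('I', 3))),
--     'lw': ('10011', (('R', 1), ('R', 2), ('D', 3))),
--     'sw': ('10100', (('R', 1), ('R', 2), ('D', 3))),
--     'j': ('11000', (('T', 1),)), 'jal': ('11001', (('T', 1),)),
--     'clrscr': ('11010', ()),
--     'la': ('10010', (('R', 1), ('Z',), ('D', 2))),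
-- }
--
-- def _encode(line, d_labels, t_labels):
--     args = line.strip().split()
--     opcode, fields = _TABLE[args[0]]
--     cmd = opcode
--     for f in fields:
--         kind = f[0]
--         if kind == 'R*':
--             cmd += ''.join(_REGS[a] for a in args[1:])
--         elif kind == 'R':
--             cmd += _REGS[args[f[1]]]
--         elif kind == 'Z':
--             cmd += '00000'
--         elif kind == 'D':
--             cmd += d_labels[args[f[1]]]
--         elif kind == 'T':
--             cmd += t_labels[args[f[1]]]
--         else:  # 'I'
--             cmd += dec2bin(int(args[f[1]]), 16)
--     return cmd + '0' * (32 - len(cmd))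
--
-- def build_text_coe(text_lines, d_labels, t_labels):
--     rows = [_encode(line, d_labels, t_labels) for line in text_lines]
--     return (['MEMORY_INITIALIZATION_RADIX=2;', 'MEMORY_INITIALIZATION_VECTOR=']
--             + [r + ',' for r in rows[:-1]] + [r + ';' for r in rows[-1:]])
-- ===== Notes on version B (the rewrite author's own statement) =====
-- stated objective: alternative
-- what changed: Replaces build_dicts plus opcode-prefix type classification and the if/elif operand dispatch by a single table mapping each op name to an (opcode, operand-format spec) pair that one uniform fold encodes field by field, and picks the ';'/',' terminator by splitting rows[:-1]/rows[-1:] instead of testing the index each iteration.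
import Mathlib
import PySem

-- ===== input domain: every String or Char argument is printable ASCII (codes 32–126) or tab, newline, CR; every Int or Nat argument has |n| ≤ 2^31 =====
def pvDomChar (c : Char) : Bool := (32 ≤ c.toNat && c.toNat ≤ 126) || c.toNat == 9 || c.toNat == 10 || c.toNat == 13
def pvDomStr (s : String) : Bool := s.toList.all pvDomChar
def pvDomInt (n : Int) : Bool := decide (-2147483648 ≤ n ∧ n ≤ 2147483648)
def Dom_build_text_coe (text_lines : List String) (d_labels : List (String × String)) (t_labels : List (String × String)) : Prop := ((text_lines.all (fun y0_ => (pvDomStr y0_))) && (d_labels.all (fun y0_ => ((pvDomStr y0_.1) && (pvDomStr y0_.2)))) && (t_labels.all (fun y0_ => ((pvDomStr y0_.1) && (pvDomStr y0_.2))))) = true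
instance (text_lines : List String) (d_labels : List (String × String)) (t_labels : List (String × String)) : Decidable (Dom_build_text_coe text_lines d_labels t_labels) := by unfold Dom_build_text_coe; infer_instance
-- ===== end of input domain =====

-- B replaces A's build_dicts + opcode-prefix classification + if/elif dispatch by a single
-- table mapping each op name to (opcode, operand-format spec) folded uniformly per line
-- (objective: alternative decomposition; same asymptotic cost).

-- dec2bin(num, digits) = bin(num)[2:].zfill(digits), shared by both Pythons (exact via PySem).
def dec2bin (num : Int) (digits : Int) : String :=
  PySem.Str.zfill (PySem.Str.slice (PySem.Int.pyBin num) (some 2) none) digits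

-- s.ljust(32, '0') = s + '0'*(32 - len(s)) — the same expression in both Pythons (exact:
-- Python pads nothing when len(s) ≥ 32, and Int.toNat clamps the negative count to 0).
def pvLjust32 (s : String) : String :=
  s ++ String.ofList (List.replicate ((32 - PySem.Str.len s).toNat) '0')

-- ===== PORT A =====
-- the 'ops' dict of build_dicts, as an association list in insertion order ('la' last)
def pvOpsA : List (String × String) :=
  [("add", "00000"), ("sub", "00001"),
   ("sll", "00010"), ("srl", "00011"), ("sra", "00100"),
   ("and", "00101"), ("or", "00110"), ("xor", "00111"),
   ("slt", "01000"), ("sgt", "01001"), ("seq", "01010"),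
   ("send", "01011"), ("recv", "01100"),
   ("jr", "01101"), ("wpix", "01110"), ("rpix", "01111"),
   ("beq", "10000"), ("bne", "10001"), ("ori", "10010"),
   ("lw", "10011"), ("sw", "10100"),
   ("j", "11000"), ("jal", "11001"), ("clrscr", "11010"),
   ("la", "10010")]

def pvTypesA : List (String × String) :=
  [("00", "r"), ("01", "r"), ("10", "i"), ("11", "j")]

-- the 'regs' dict: three literal entries, then the loop 'for i in range(3, 32)' appending
-- fresh keys in insertion order
def pvRegsA : List (String × String) :=
  (PySem.List.pyRange 3 32 1).foldl
    (fun d i => d ++ [("$r" ++ PySem.Int.toStr i, dec2bin i 5)])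
    [("$zero", "00000"), ("$pc", "00001"), ("$ra", "00010")]

-- the body of A's loop after 'args = line.strip().split()'; dict lookups use '.getD ""' /
-- 'int(...)' uses '.getD 0' where Python would raise KeyError/IndexError/ValueError —
-- those inputs are excluded by Pre_build_text_coe
def pvEncA (d_labels t_labels : List (String × String)) (args : List String) : String :=
  let op := (PySem.List.pyGet? args 0).getD ""
  let binop := (pvOpsA.lookup op).getD ""
  let optype := (pvTypesA.lookup (PySem.Str.slice binop (some 0) (some 2))).getD ""
  let cmd := binop
  if optype == "r" then
    (PySem.List.pyRange 1 (PySem.List.len args) 1).foldl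
      (fun c j => c ++ (pvRegsA.lookup (PySem.List.pyGetD args j "")).getD "") cmd
  else if optype == "i" then
    if op == "la" then
      cmd ++ ((pvRegsA.lookup (PySem.List.pyGetD args 1 "")).getD "" ++
        (pvRegsA.lookup "$zero").getD "" ++
        (d_labels.lookup (PySem.List.pyGetD args 2 "")).getD "")
    else if op == "lw" || op == "sw" then
      cmd ++ ((pvRegsA.lookup (PySem.List.pyGetD args 1 "")).getD "" ++
        (pvRegsA.lookup (PySem.List.pyGetD args 2 "")).getD "" ++
        (d_labels.lookup (PySem.List.pyGetD args 3 "")).getD "")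
    else if op == "beq" || op == "bne" then
      cmd ++ ((pvRegsA.lookup (PySem.List.pyGetD args 1 "")).getD "" ++
        (pvRegsA.lookup (PySem.List.pyGetD args 2 "")).getD "" ++
        (t_labels.lookup (PySem.List.pyGetD args 3 "")).getD "")
    else
      cmd ++ ((pvRegsA.lookup (PySem.List.pyGetD args 1 "")).getD "" ++
        (pvRegsA.lookup (PySem.List.pyGetD args 2 "")).getD "" ++
        dec2bin ((PySem.Int.ofStr? (PySem.List.pyGetD args 3 "")).getD 0) 16)
  else
    if op == "j" || op == "jal" then
      cmd ++ (t_labels.lookup (PySem.List.pyGetD args 1 "")).getD ""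
    else cmd

def build_text_coe (text_lines : List String) (d_labels : List (String × String)) (t_labels : List (String × String)) : List String :=
  (PySem.List.enumerate text_lines 0).foldl
    (fun acc p =>
      acc ++ [pvLjust32 (pvEncA d_labels t_labels (PySem.Str.split₀ (PySem.Str.strip p.2))) ++
        (if p.1 == PySem.List.len text_lines - 1 then ";" else ",")])
    ["MEMORY_INITIALIZATION_RADIX=2;", "MEMORY_INITIALIZATION_VECTOR="]

-- ===== PORT B =====
-- an operand-field descriptor of B's _TABLE
inductive PvField : Type
  | reg : Int → PvField       -- ('R', i): register at args[i]
  | zero : PvField            -- ('Z',): literal $zero field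
  | dlab : Int → PvField      -- ('D', i): data label at args[i]
  | tlab : Int → PvField      -- ('T', i): text label at args[i]
  | imm : Int → PvField       -- ('I', i): 16-bit immediate at args[i]
  | regTail : PvField         -- ('R*',): all registers args[1:]
  deriving DecidableEq, Repr

-- B's _REGS: literal entries plus a comprehension over range(3, 32)
def pvRegsB : List (String × String) :=
  [("$zero", "00000"), ("$pc", "00001"), ("$ra", "00010")] ++
    (PySem.List.pyRange 3 32 1).map (fun i => ("$r" ++ PySem.Int.toStr i, dec2bin i 5))

-- B's _TABLE: op name ↦ (opcode, operand-format spec)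
def pvTable : List (String × String × List PvField) :=
  [("add", "00000", [.regTail]), ("sub", "00001", [.regTail]),
   ("sll", "00010", [.regTail]), ("srl", "00011", [.regTail]), ("sra", "00100", [.regTail]),
   ("and", "00101", [.regTail]), ("or", "00110", [.regTail]), ("xor", "00111", [.regTail]),
   ("slt", "01000", [.regTail]), ("sgt", "01001", [.regTail]), ("seq", "01010", [.regTail]),
   ("send", "01011", [.regTail]), ("recv", "01100", [.regTail]),
   ("jr", "01101", [.regTail]), ("wpix", "01110", [.regTail]), ("rpix", "01111", [.regTail]),
   ("beq", "10000", [.reg 1, .reg 2, .tlab 3]),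
   ("bne", "10001", [.reg 1, .reg 2, .tlab 3]),
   ("ori", "10010", [.reg 1, .reg 2, .imm 3]),
   ("lw", "10011", [.reg 1, .reg 2, .dlab 3]),
   ("sw", "10100", [.reg 1, .reg 2, .dlab 3]),
   ("j", "11000", [.tlab 1]), ("jal", "11001", [.tlab 1]), ("clrscr", "11010", []),
   ("la", "10010", [.reg 1, .zero, .dlab 2])]

-- B's _encode before the padding: fold the operand spec, appending each encoded field
def pvEncB (d_labels t_labels : List (String × String)) (args : List String) : String :=
  let spec := (pvTable.lookup ((PySem.List.pyGet? args 0).getD "")).getD ("", [])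
  spec.2.foldl
    (fun c f =>
      match f with
      | .regTail =>
          c ++ PySem.Str.join ""
            ((PySem.List.slice args (some 1) none).map (fun a => (pvRegsB.lookup a).getD ""))
      | .reg i => c ++ (pvRegsB.lookup (PySem.List.pyGetD args i "")).getD ""
      | .zero => c ++ "00000"
      | .dlab i => c ++ (d_labels.lookup (PySem.List.pyGetD args i "")).getD ""
      | .tlab i => c ++ (t_labels.lookup (PySem.List.pyGetD args i "")).getD ""
      | .imm i => c ++ dec2bin ((PySem.Int.ofStr? (PySem.List.pyGetD args i "")).getD 0) 16)
    spec.1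

def build_text_coe_alt (text_lines : List String) (d_labels : List (String × String)) (t_labels : List (String × String)) : List String :=
  let rows := text_lines.map
    (fun line => pvLjust32 (pvEncB d_labels t_labels (PySem.Str.split₀ (PySem.Str.strip line))))
  ["MEMORY_INITIALIZATION_RADIX=2;", "MEMORY_INITIALIZATION_VECTOR="] ++
    (PySem.List.slice rows none (some (-1))).map (fun r => r ++ ",") ++
    (PySem.List.slice rows (some (-1)) none).map (fun r => r ++ ";")

-- ===== PRECONDITION & SPEC =====
-- helper vocabulary for Pre_ (its own literals; it does not reach either port)
def pvPreRegNames : List String :=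
  ["$zero", "$pc", "$ra"] ++ ((List.range 32).drop 3).map (fun i => "$r" ++ PySem.Int.toStr i)

def pvPreRTypeOps : List String :=
  ["add", "sub", "sll", "srl", "sra", "and", "or", "xor",
   "slt", "sgt", "seq", "send", "recv", "jr", "wpix", "rpix"]

-- one line is well-formed: known op, the operands its format needs are present,
-- registers/labels are known, the immediate parses as a Python int
def pvLineOK (d_labels t_labels : List (String × String)) (line : String) : Bool :=
  match PySem.Str.split₀ (PySem.Str.strip line) with
  | [] => false
  | op :: rest =>
    if op ∈ pvPreRTypeOps then rest.all (fun r => r ∈ pvPreRegNames)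
    else if op == "la" then
      match rest with
      | r :: d :: _ => r ∈ pvPreRegNames && (d_labels.lookup d).isSome
      | _ => false
    else if op == "lw" || op == "sw" then
      match rest with
      | r1 :: r2 :: d :: _ =>
          r1 ∈ pvPreRegNames && r2 ∈ pvPreRegNames && (d_labels.lookup d).isSome
      | _ => false
    else if op == "beq" || op == "bne" then
      match rest with
      | r1 :: r2 :: t :: _ =>
          r1 ∈ pvPreRegNames && r2 ∈ pvPreRegNames && (t_labels.lookup t).isSome
      | _ => false
    else if op == "ori" then
      match rest with
      | r1 :: r2 :: i :: _ =>
          r1 ∈ pvPreRegNames && r2 ∈ pvPreRegNames && (PySem.Int.ofStr? i).isSome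
      | _ => false
    else if op == "j" || op == "jal" then
      match rest with
      | t :: _ => (t_labels.lookup t).isSome
      | _ => false
    else op == "clrscr"

-- Pre_ excludes exactly the lines on which the Python raises (IndexError on a blank or
-- too-short line, KeyError on an unknown op/register/label, ValueError on a bad immediate);
-- B raises on the same lines.
def Pre_build_text_coe (text_lines : List String) (d_labels : List (String × String)) (t_labels : List (String × String)) : Prop :=
  (text_lines.all (pvLineOK d_labels t_labels)) = true

instance (text_lines : List String) (d_labels : List (String × String)) (t_labels : List (String × String)) : Decidable (Pre_build_text_coe text_lines d_labels t_labels) := by unfold Pre_build_text_coe; infer_instance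

def pvWitness_build_text_coe : List String × (List (String × String)) × (List (String × String)) :=
  (["la $r3 dx", "ori $r4 $zero 7", "beq $r3 $r4 L1", "add $r5 $r3 $r4", "j L1", "clrscr"],
   [("dx", "0000000000000101")],
   [("L1", "0000000000000010")])

def Spec_build_text_coe (text_lines : List String) (d_labels : List (String × String)) (t_labels : List (String × String)) (out : List String) : Prop := out = build_text_coe_alt text_lines d_labels t_labels
instance (text_lines : List String) (d_labels : List (String × String)) (t_labels : List (String × String)) (out : List String) : Decidable (Spec_build_text_coe text_lines d_labels t_labels out) := by unfold Spec_build_text_coe; infer_instance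

-- ===== CLAIM (what is proved, stated in full; the proofs are below) =====
def Claim_equal_build_text_coe : Prop := ∀ (text_lines : List String) (d_labels : List (String × String)) (t_labels : List (String × String)), Dom_build_text_coe text_lines d_labels t_labels → Pre_build_text_coe text_lines d_labels t_labels → Spec_build_text_coe text_lines d_labels t_labels (build_text_coe text_lines d_labels t_labels)

-- ===== LEMMAS AND PROOFS =====

theorem pvRegs_eq : pvRegsA = pvRegsB := by decide

theorem pv_join_empty_nil : PySem.Str.join "" ([] : List String) = "" := by
  apply String.toList_inj.mp
  simp [PySem.Str.join, PySem.Chars.join, List.intercalate]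

theorem pv_join_empty_cons (x : String) (l : List String) :
    PySem.Str.join "" (x :: l) = x ++ PySem.Str.join "" l := by
  cases l with
  | nil =>
    apply String.toList_inj.mp
    simp [PySem.Str.join, PySem.Chars.join, List.intercalate]
  | cons y ys =>
    apply String.toList_inj.mp
    simp [PySem.Str.join, PySem.Chars.join_cons_cons]

theorem pv_loop_aux (g : String → String) :
    ∀ (ys pre : List String) (c : String),
      (PySem.List.pyRange pre.length (pre.length + ys.length) 1).foldl
          (fun c j => c ++ g (PySem.List.pyGetD (pre ++ ys) j "")) c
        = c ++ PySem.Str.join "" (ys.map g) := by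
  intro ys
  induction ys with
  | nil =>
    intro pre c
    rw [PySem.List.pyRange_one_eq_nil (by simp)]
    simp [pv_join_empty_nil]
  | cons y ys ih =>
    intro pre c
    rw [PySem.List.pyRange_one_cons (by push_cast [List.length_cons]; omega)]
    simp only [List.foldl_cons]
    have hget : PySem.List.pyGetD (pre ++ y :: ys) (pre.length : Int) "" = y := by
      simp [PySem.List.pyGetD_natCast, List.getD_append_right, List.getD]
    rw [hget]
    have hb : (pre.length : Int) + 1 = ((pre ++ [y]).length : Int) := by push_cast; simp
    have he : (pre.length : Int) + ((y :: ys).length : Int) = ((pre ++ [y]).length : Int) + (ys.length : Int) := by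
      push_cast; simp; omega
    rw [hb, he]
    have hl : pre ++ y :: ys = (pre ++ [y]) ++ ys := by simp
    rw [hl, ih (pre ++ [y]) (c ++ g y)]
    rw [List.map_cons, pv_join_empty_cons]
    apply String.toList_inj.mp
    simp

-- A's r-type register loop equals B's single concatenation of the looked-up tail
theorem pv_loopA (g : String → String) (x : String) (t : List String) (c : String) :
    (PySem.List.pyRange 1 (PySem.List.len (x :: t)) 1).foldl
        (fun c j => c ++ g (PySem.List.pyGetD (x :: t) j "")) c
      = c ++ PySem.Str.join "" (t.map g) := by
  have h := pv_loop_aux g t [x] c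
  simp only [List.length_singleton, Nat.cast_one, List.singleton_append] at h
  rw [show PySem.List.len (x :: t) = 1 + (t.length : Int) from by
        simp [PySem.List.len_eq]; push_cast; ring]
  exact h

-- one r-type case

theorem pv_zero_lookup : (List.lookup "$zero" pvRegsB).getD "" = "00000" := by decide

-- one r-type line: A's range-indexed loop vs B's regTail field
theorem pv_enc_r (d t : List (String × String)) (op : String) (rest : List String)
    (code : String)
    (hA : pvOpsA.lookup op = some code)
    (htype : pvTypesA.lookup (PySem.Str.slice code (some 0) (some 2)) = some "r")
    (hB : pvTable.lookup op = some (code, [PvField.regTail])) :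
    pvEncA d t (op :: rest) = pvEncB d t (op :: rest) := by
  unfold pvEncA pvEncB
  simp only [PySem.List.pyGet?_zero_cons, Option.getD_some, hA, htype, hB, beq_self_eq_true,
    if_true, List.foldl_cons, List.foldl_nil, PySem.List.slice_from_one, List.tail_cons,
    pvRegs_eq]
  exact pv_loopA (fun s => (List.lookup s pvRegsB).getD "") op rest code

-- the per-line encoders agree on every argument list
theorem pv_enc_eq (d_labels t_labels : List (String × String)) (args : List String) :
    pvEncA d_labels t_labels args = pvEncB d_labels t_labels args := by
  cases args with
  | nil => rfl
  | cons op rest =>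
    rcases eq_or_ne op "add" with rfl | h0
    · exact pv_enc_r d_labels t_labels "add" rest "00000" (by decide) (by decide) (by decide)
    rcases eq_or_ne op "sub" with rfl | h1
    · exact pv_enc_r d_labels t_labels "sub" rest "00001" (by decide) (by decide) (by decide)
    rcases eq_or_ne op "sll" with rfl | h2
    · exact pv_enc_r d_labels t_labels "sll" rest "00010" (by decide) (by decide) (by decide)
    rcases eq_or_ne op "srl" with rfl | h3
    · exact pv_enc_r d_labels t_labels "srl" rest "00011" (by decide) (by decide) (by decide)
    rcases eq_or_ne op "sra" with rfl | h4
    · exact pv_enc_r d_labels t_labels "sra" rest "00100" (by decide) (by decide) (by decide)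
    rcases eq_or_ne op "and" with rfl | h5
    · exact pv_enc_r d_labels t_labels "and" rest "00101" (by decide) (by decide) (by decide)
    rcases eq_or_ne op "or" with rfl | h6
    · exact pv_enc_r d_labels t_labels "or" rest "00110" (by decide) (by decide) (by decide)
    rcases eq_or_ne op "xor" with rfl | h7
    · exact pv_enc_r d_labels t_labels "xor" rest "00111" (by decide) (by decide) (by decide)
    rcases eq_or_ne op "slt" with rfl | h8
    · exact pv_enc_r d_labels t_labels "slt" rest "01000" (by decide) (by decide) (by decide)
    rcases eq_or_ne op "sgt" with rfl | h9
    · exact pv_enc_r d_labels t_labels "sgt" rest "01001" (by decide) (by decide) (by decide)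
    rcases eq_or_ne op "seq" with rfl | h10
    · exact pv_enc_r d_labels t_labels "seq" rest "01010" (by decide) (by decide) (by decide)
    rcases eq_or_ne op "send" with rfl | h11
    · exact pv_enc_r d_labels t_labels "send" rest "01011" (by decide) (by decide) (by decide)
    rcases eq_or_ne op "recv" with rfl | h12
    · exact pv_enc_r d_labels t_labels "recv" rest "01100" (by decide) (by decide) (by decide)
    rcases eq_or_ne op "jr" with rfl | h13
    · exact pv_enc_r d_labels t_labels "jr" rest "01101" (by decide) (by decide) (by decide)
    rcases eq_or_ne op "wpix" with rfl | h14
    · exact pv_enc_r d_labels t_labels "wpix" rest "01110" (by decide) (by decide) (by decide)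
    rcases eq_or_ne op "rpix" with rfl | h15
    · exact pv_enc_r d_labels t_labels "rpix" rest "01111" (by decide) (by decide) (by decide)
    rcases eq_or_ne op "beq" with rfl | h16
    · unfold pvEncA pvEncB
      simp [pvOpsA, pvTypesA, pvTable, List.lookup,
        (show PySem.Str.slice "10000" (some 0) (some 2) = "10" by decide),
        pv_zero_lookup, pvRegs_eq, String.append_assoc]
    rcases eq_or_ne op "bne" with rfl | h17
    · unfold pvEncA pvEncB
      simp [pvOpsA, pvTypesA, pvTable, List.lookup,
        (show PySem.Str.slice "10001" (some 0) (some 2) = "10" by decide),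
        pv_zero_lookup, pvRegs_eq, String.append_assoc]
    rcases eq_or_ne op "ori" with rfl | h18
    · unfold pvEncA pvEncB
      simp [pvOpsA, pvTypesA, pvTable, List.lookup,
        (show PySem.Str.slice "10010" (some 0) (some 2) = "10" by decide),
        pv_zero_lookup, pvRegs_eq, String.append_assoc]
    rcases eq_or_ne op "lw" with rfl | h19
    · unfold pvEncA pvEncB
      simp [pvOpsA, pvTypesA, pvTable, List.lookup,
        (show PySem.Str.slice "10011" (some 0) (some 2) = "10" by decide),
        pv_zero_lookup, pvRegs_eq, String.append_assoc]
    rcases eq_or_ne op "sw" with rfl | h20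
    · unfold pvEncA pvEncB
      simp [pvOpsA, pvTypesA, pvTable, List.lookup,
        (show PySem.Str.slice "10100" (some 0) (some 2) = "10" by decide),
        pv_zero_lookup, pvRegs_eq, String.append_assoc]
    rcases eq_or_ne op "j" with rfl | h21
    · unfold pvEncA pvEncB
      simp [pvOpsA, pvTypesA, pvTable, List.lookup,
        (show PySem.Str.slice "11000" (some 0) (some 2) = "11" by decide),
        pv_zero_lookup, pvRegs_eq, String.append_assoc]
    rcases eq_or_ne op "jal" with rfl | h22
    · unfold pvEncA pvEncB
      simp [pvOpsA, pvTypesA, pvTable, List.lookup,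
        (show PySem.Str.slice "11001" (some 0) (some 2) = "11" by decide),
        pv_zero_lookup, pvRegs_eq, String.append_assoc]
    rcases eq_or_ne op "clrscr" with rfl | h23
    · unfold pvEncA pvEncB
      simp [pvOpsA, pvTypesA, pvTable, List.lookup,
        (show PySem.Str.slice "11010" (some 0) (some 2) = "11" by decide),
        pv_zero_lookup, pvRegs_eq, String.append_assoc]
    rcases eq_or_ne op "la" with rfl | h24
    · unfold pvEncA pvEncB
      simp [pvOpsA, pvTypesA, pvTable, List.lookup,
        (show PySem.Str.slice "10010" (some 0) (some 2) = "10" by decide),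
        pv_zero_lookup, pvRegs_eq, String.append_assoc]
    unfold pvEncA pvEncB
    simp [pvOpsA, pvTypesA, pvTable, List.lookup, beq_iff_eq,
      (show PySem.Str.slice "" (some 0) (some 2) = "" by decide),
      (beq_eq_false_iff_ne.mpr h0), (beq_eq_false_iff_ne.mpr h1), (beq_eq_false_iff_ne.mpr h2), (beq_eq_false_iff_ne.mpr h3), (beq_eq_false_iff_ne.mpr h4), (beq_eq_false_iff_ne.mpr h5), (beq_eq_false_iff_ne.mpr h6), (beq_eq_false_iff_ne.mpr h7), (beq_eq_false_iff_ne.mpr h8), (beq_eq_false_iff_ne.mpr h9), (beq_eq_false_iff_ne.mpr h10), (beq_eq_false_iff_ne.mpr h11), (beq_eq_false_iff_ne.mpr h12), (beq_eq_false_iff_ne.mpr h13), (beq_eq_false_iff_ne.mpr h14), (beq_eq_false_iff_ne.mpr h15), (beq_eq_false_iff_ne.mpr h16), (beq_eq_false_iff_ne.mpr h17), (beq_eq_false_iff_ne.mpr h18), (beq_eq_false_iff_ne.mpr h19), (beq_eq_false_iff_ne.mpr h20), (beq_eq_false_iff_ne.mpr h21), (beq_eq_false_iff_ne.mpr h22),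 (beq_eq_false_iff_ne.mpr h23), (beq_eq_false_iff_ne.mpr h24)]

-- A's enumerate loop terminator choice equals B's rows[:-1] / rows[-1:] split
theorem pv_tail_eq (f : String → String) (xs : List String) :
    (PySem.List.enumerate xs 0).map
        (fun p => f p.2 ++ (if p.1 == PySem.List.len xs - 1 then ";" else ","))
      = ((xs.map f).dropLast).map (fun r => r ++ ",") ++
        ((xs.map f).drop (xs.length - 1)).map (fun r => r ++ ";") := by
  rcases List.eq_nil_or_concat xs with rfl | ⟨ys, y, rfl⟩
  · simp [PySem.List.enumerate]
  · rw [List.concat_eq_append, PySem.List.enumerate_append]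
    simp only [List.map_append, PySem.List.len_eq, List.length_append, List.length_cons,
      List.length_nil, zero_add, add_zero, List.map_cons, List.map_nil]
    have h2 : List.drop (ys.length + 1 - 1) (ys.map f ++ [f y]) = [f y] := by
      simp
    have h1 : (ys.map f ++ [f y]).dropLast = ys.map f := by simp
    rw [h1, h2]
    congr 1
    · rw [List.map_congr_left (g := fun p => f p.2 ++ ",") ?agree]
      · calc List.map (fun p => f p.2 ++ ",") (PySem.List.enumerate ys 0)
            = ((PySem.List.enumerate ys 0).map (fun x => x.2)).map (fun s => f s ++ ",") := by
              rw [List.map_map]; rfl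
          _ = ys.map (fun s => f s ++ ",") := by rw [PySem.List.map_snd_enumerate]
          _ = List.map (fun r => r ++ ",") (List.map f ys) := by rw [List.map_map]; rfl
      · intro p hp
        rw [PySem.List.mem_enumerate_iff] at hp
        obtain ⟨k, hk, rfl⟩ := hp
        simp only []
        rw [if_neg]
        simp only [beq_iff_eq]
        push_cast
        omega
    · simp only [PySem.List.enumerate, List.map_cons, List.map_nil]
      rw [if_pos (by simp)]

-- ===== VERDICT (by name: the statement is the Claim_ definition above) =====
theorem build_text_coe_spec : Claim_equal_build_text_coe := by
  intro text_lines d_labels t_labels _ _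
  unfold Spec_build_text_coe build_text_coe build_text_coe_alt
  simp only [PySem.List.foldl_append_singleton_eq_map, PySem.List.slice_to_neg_one,
    PySem.List.slice_from_neg_one, List.length_map]
  rw [pv_tail_eq (fun line => pvLjust32 (pvEncA d_labels t_labels (PySem.Str.split₀ (PySem.Str.strip line)))) text_lines]
  simp only [pv_enc_eq]
  rw [List.append_assoc]
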